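-- pv_equiv track=rewrite | github.com/yoonwooseong/AlgorithmBox | 알고리즘/해시/해시2.py | solution
-- ===== SOURCE A (Python) =====
-- def solution(phone_book):
--     answer = True
--     phone_book.sort()
--     for i in range(0,len(phone_book)):
--         for j in range(i+1,len(phone_book)):
--             if phone_book[i] in phone_book[j]:
--                 answer = False
--                 return answer
--     return answer
-- ===== SOURCE B (Python) =====
-- def solution(phone_book):
--     for i, x in enumerate(phone_book):
--         for j, y in enumerate(phone_book):
--             if i != j and x in y:
--                 return False
--     return True
-- ===== Notes on version B (the rewrite author's own statement) =====
-- stated objective: simpler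
-- what changed: B drops the sort and the triangular index scan entirely and simply tests every distinct ordered pair for the substring relation on the unsorted list, skipping A's O(n log n) string sort (A also sorts its argument in place; B does not mutate it).
-- intended difference: On lists that contain a substring pair but no pair (x, y) with x a substring of y and x <= y lexicographically (e.g. ['ab','b']), A's sorted forward scan never compares the substring against the longer string and wrongly returns True, while B returns False, the intended answer to 'is any entry a substring of another'. — e.g. on solution(["ab", "b"]): A returns true, B returns false
import Mathlib
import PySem

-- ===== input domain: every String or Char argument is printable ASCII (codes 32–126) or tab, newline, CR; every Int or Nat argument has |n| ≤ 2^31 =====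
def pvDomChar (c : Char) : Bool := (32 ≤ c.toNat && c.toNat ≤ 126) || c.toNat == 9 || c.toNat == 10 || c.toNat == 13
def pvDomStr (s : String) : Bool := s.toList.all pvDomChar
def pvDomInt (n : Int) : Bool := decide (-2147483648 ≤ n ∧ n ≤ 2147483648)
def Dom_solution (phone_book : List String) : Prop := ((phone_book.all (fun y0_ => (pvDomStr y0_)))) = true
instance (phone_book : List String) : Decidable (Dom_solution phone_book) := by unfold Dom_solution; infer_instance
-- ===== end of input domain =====

-- B tests every distinct ordered pair for the substring relation, with no sort; equivalence is about
-- the RETURN value only (A sorts its argument in place, B does not mutate it). On lists with a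
-- substring pair but no lexicographically ordered one, A wrongly returns true and B returns false
-- (see D_solution below).

-- ===== PORT A =====
def solution (phone_book : List String) : Bool :=
  let answer := true
  let pb := PySem.List.sorted phone_book (fun x => x) false
  if (PySem.List.pyRange 0 (PySem.List.len pb) 1).any (fun i =>
       (PySem.List.pyRange (i + 1) (PySem.List.len pb) 1).any (fun j =>
         PySem.Str.isIn (PySem.List.pyGetD pb i "") (PySem.List.pyGetD pb j "")))
  then false else answer

-- ===== PORT B =====
def solution_alt (phone_book : List String) : Bool :=
  if (PySem.List.enumerate phone_book 0).any (fun ix =>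
       (PySem.List.enumerate phone_book 0).any (fun jy =>
         ix.1 != jy.1 && PySem.Str.isIn ix.2 jy.2))
  then false else true

-- ===== PRECONDITION & SPEC =====
-- On lists containing a substring pair but no pair (x, y) with x a substring of y and x ≤ y
-- lexicographically, A's sorted forward scan misses the pair and returns true; B returns false,
-- the intended answer to "is any entry a substring of another".
def D_solution (phone_book : List String) : Prop :=
  (∃ p < phone_book.length, ∃ q < phone_book.length, p ≠ q ∧
      PySem.Str.isIn (phone_book.getD p "") (phone_book.getD q "") = true)
  ∧ ¬ (∃ p < phone_book.length, ∃ q < phone_book.length, p ≠ q ∧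
      phone_book.getD p "" ≤ phone_book.getD q "" ∧
      PySem.Str.isIn (phone_book.getD p "") (phone_book.getD q "") = true)
instance (phone_book : List String) : Decidable (D_solution phone_book) := by
  unfold D_solution; infer_instance

def Spec_solution (phone_book : List String) (out : Bool) : Prop :=
  ¬ D_solution phone_book → out = solution_alt phone_book
instance (phone_book : List String) (out : Bool) : Decidable (Spec_solution phone_book out) := by
  unfold Spec_solution; infer_instance

def pvDiffWitness_solution : List String := ["ab", "b"]
def pvDiffWitnessOut_solution : Bool × Bool := (true, false)

-- ===== CLAIM (what is proved, stated in full; the proofs are below) =====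
def Claim_unchanged_solution : Prop := ∀ (phone_book : List String), Dom_solution phone_book → Spec_solution phone_book (solution phone_book)
def Claim_changed_solution : Prop := Dom_solution (pvDiffWitness_solution) ∧ D_solution (pvDiffWitness_solution) ∧ solution (pvDiffWitness_solution) = pvDiffWitnessOut_solution.1 ∧ solution_alt (pvDiffWitness_solution) = pvDiffWitnessOut_solution.2 ∧ pvDiffWitnessOut_solution.1 ≠ pvDiffWitnessOut_solution.2
def Claim_exact_solution : Prop := ∀ (phone_book : List String), Dom_solution phone_book → D_solution phone_book → solution phone_book ≠ solution_alt phone_book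

-- ===== LEMMAS AND PROOFS =====

-- a permutation of a two-element list is one of its two arrangements
lemma pv_perm_pair {α : Type} {l : List α} {a b : α} (h : l.Perm [a, b]) :
    l = [a, b] ∨ l = [b, a] := by
  obtain ⟨c, d, rfl⟩ := List.length_eq_two.mp (h.length_eq.trans rfl)
  have hc : c ∈ [a, b] := h.subset (by simp)
  rcases List.mem_pair.mp hc with rfl | rfl
  · left
    have hd : [d] = [b] := List.perm_singleton.mp h.cons_inv
    simp at hd
    simp [hd]
  · right
    have hd : [d] = [a] := List.perm_singleton.mp ((h.trans (List.Perm.swap c a [])).cons_inv)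
    simp at hd
    simp [hd]

-- [a,b] is a sublist of l iff a appears strictly before b
lemma pv_pair_sublist_iff {α : Type} (l : List α) (a b : α) :
    [a, b].Sublist l ↔ ∃ p q : Nat, p < q ∧ l[p]? = some a ∧ l[q]? = some b := by
  induction l with
  | nil => simp
  | cons x t ih =>
    constructor
    · intro h
      rcases List.sublist_cons_iff.mp h with h' | ⟨r, hr, hsub⟩
      · obtain ⟨p, q, hpq, hp, hq⟩ := ih.mp h'
        exact ⟨p + 1, q + 1, by omega, by simpa using hp, by simpa using hq⟩
      · injection hr with h1 h2
        subst h1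
        rw [← h2] at hsub
        have hb : b ∈ t := List.singleton_sublist.mp hsub
        obtain ⟨q, hq⟩ := List.mem_iff_getElem?.mp hb
        exact ⟨0, q + 1, by omega, by simp, by simpa using hq⟩
    · rintro ⟨p, q, hpq, hp, hq⟩
      match p, q with
      | 0, q + 1 =>
        simp at hp
        subst hp
        have hb : b ∈ t := List.mem_of_getElem? (by simpa using hq)
        exact List.cons_sublist_cons.mpr (List.singleton_sublist.mpr hb)
      | p + 1, q + 1 =>
        exact (ih.mpr ⟨p, q, by omega, by simpa using hp, by simpa using hq⟩).cons _

-- [a,b] is a sub-multiset of l iff a and b occupy two distinct positions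
lemma pv_pair_subperm_iff {α : Type} (l : List α) (a b : α) :
    [a, b].Subperm l ↔ ∃ p q : Nat, p ≠ q ∧ l[p]? = some a ∧ l[q]? = some b := by
  constructor
  · rintro ⟨l', hperm, hsub⟩
    rcases pv_perm_pair hperm with rfl | rfl
    · obtain ⟨p, q, hpq, hp, hq⟩ := (pv_pair_sublist_iff l a b).mp hsub
      exact ⟨p, q, by omega, hp, hq⟩
    · obtain ⟨p, q, hpq, hp, hq⟩ := (pv_pair_sublist_iff l b a).mp hsub
      exact ⟨q, p, by omega, hq, hp⟩
  · rintro ⟨p, q, hpq, hp, hq⟩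
    rcases Nat.lt_or_ge p q with h | h
    · exact ((pv_pair_sublist_iff l a b).mpr ⟨p, q, h, hp, hq⟩).subperm
    · have hqp : q < p := by omega
      exact ⟨[b, a], List.Perm.swap a b [], (pv_pair_sublist_iff l b a).mpr ⟨q, p, hqp, hq, hp⟩⟩

-- the multiset-level condition A detects: an ordered substring pair
def pvHit (xs : List String) : Prop :=
  ∃ a b : String, a ≤ b ∧ PySem.Str.isIn a b = true ∧ [a, b].Subperm xs

lemma pv_condA_iff (xs : List String) :
    (∃ p q : Nat, p < q ∧ ∃ a b,
        (PySem.List.sorted xs (fun x => x) false)[p]? = some a ∧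
        (PySem.List.sorted xs (fun x => x) false)[q]? = some b ∧
        PySem.Str.isIn a b = true)
    ↔ pvHit xs := by
  constructor
  · rintro ⟨p, q, hpq, a, b, hp, hq, hin⟩
    obtain ⟨hp', hap⟩ := List.getElem?_eq_some_iff.mp hp
    obtain ⟨hq', hbq⟩ := List.getElem?_eq_some_iff.mp hq
    have hmono := PySem.List.sorted_id_getElem_mono (xs := xs) (Nat.le_of_lt hpq) hq'
    rw [hap, hbq] at hmono
    exact ⟨a, b, hmono, hin,
      (((pv_pair_sublist_iff _ a b).mpr ⟨p, q, hpq, hp, hq⟩).subperm).trans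
        (PySem.List.sorted_perm xs (fun x => x) false).subperm⟩
  · rintro ⟨a, b, hab, hin, hsp⟩
    have hsp' : [a, b].Subperm (PySem.List.sorted xs (fun x => x) false) :=
      hsp.trans (PySem.List.sorted_perm xs (fun x => x) false).symm.subperm
    obtain ⟨p, q, hpq, hp, hq⟩ := (pv_pair_subperm_iff _ a b).mp hsp'
    rcases Nat.lt_or_ge p q with h | h
    · exact ⟨p, q, h, a, b, hp, hq, hin⟩
    · have hqp : q < p := by omega
      obtain ⟨hp', hap⟩ := List.getElem?_eq_some_iff.mp hp
      obtain ⟨hq', hbq⟩ := List.getElem?_eq_some_iff.mp hq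
      have hmono := PySem.List.sorted_id_getElem_mono (xs := xs) (Nat.le_of_lt hqp) hp'
      rw [hap, hbq] at hmono
      have hba : a = b := le_antisymm hab hmono
      subst hba
      exact ⟨q, p, hqp, a, a, hq, hp, hin⟩

-- D_'s second conjunct (the ordered-pair condition, stated over positions) is exactly pvHit
lemma pv_ord_iff (xs : List String) :
    (∃ p < xs.length, ∃ q < xs.length, p ≠ q ∧
        xs.getD p "" ≤ xs.getD q "" ∧
        PySem.Str.isIn (xs.getD p "") (xs.getD q "") = true)
    ↔ pvHit xs := by
  constructor
  · rintro ⟨p, hp, q, hq, hpq, hle, hin⟩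
    simp only [List.getD_eq_getElem?_getD, List.getElem?_eq_getElem hp,
      List.getElem?_eq_getElem hq, Option.getD_some] at hle hin
    exact ⟨xs[p], xs[q], hle, hin,
      (pv_pair_subperm_iff xs _ _).mpr ⟨p, q, hpq, List.getElem?_eq_getElem hp,
        List.getElem?_eq_getElem hq⟩⟩
  · rintro ⟨a, b, hab, hin, hsp⟩
    obtain ⟨p, q, hpq, hp, hq⟩ := (pv_pair_subperm_iff xs a b).mp hsp
    obtain ⟨hp', hap⟩ := List.getElem?_eq_some_iff.mp hp
    obtain ⟨hq', hbq⟩ := List.getElem?_eq_some_iff.mp hq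
    refine ⟨p, hp', q, hq', hpq, ?_, ?_⟩ <;>
      simp only [List.getD_eq_getElem?_getD, List.getElem?_eq_getElem hp',
        List.getElem?_eq_getElem hq', Option.getD_some, hap, hbq]
    · exact hab
    · exact hin

lemma pv_anyA_iff (xs : List String) :
    ((PySem.List.pyRange 0 (PySem.List.len (PySem.List.sorted xs (fun x => x) false)) 1).any (fun i =>
       (PySem.List.pyRange (i + 1) (PySem.List.len (PySem.List.sorted xs (fun x => x) false)) 1).any (fun j =>
         PySem.Str.isIn (PySem.List.pyGetD (PySem.List.sorted xs (fun x => x) false) i "")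
                        (PySem.List.pyGetD (PySem.List.sorted xs (fun x => x) false) j ""))) = true)
    ↔ pvHit xs := by
  rw [← pv_condA_iff]
  rw [List.any_eq_true]
  constructor
  · rintro ⟨i, hi, hinner⟩
    obtain ⟨hi0, hin⟩ := (PySem.List.mem_pyRange_one).mp hi
    rw [List.any_eq_true] at hinner
    obtain ⟨j, hj, hgood⟩ := hinner
    obtain ⟨hj0, hjn⟩ := (PySem.List.mem_pyRange_one).mp hj
    simp only [PySem.List.len_eq] at hin hjn
    obtain ⟨ip, rfl⟩ : ∃ k : Nat, i = (k : Int) := ⟨i.toNat, by omega⟩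
    obtain ⟨jq, rfl⟩ : ∃ k : Nat, j = (k : Int) := ⟨j.toNat, by omega⟩
    have hip : ip < (PySem.List.sorted xs (fun x => x) false).length := by omega
    have hjq : jq < (PySem.List.sorted xs (fun x => x) false).length := by omega
    simp only [PySem.List.pyGetD_natCast, List.getD_eq_getElem?_getD,
      List.getElem?_eq_getElem hip, List.getElem?_eq_getElem hjq, Option.getD_some] at hgood
    exact ⟨ip, jq, by omega, _, _, List.getElem?_eq_getElem hip, List.getElem?_eq_getElem hjq, hgood⟩
  · rintro ⟨p, q, hpq, a, b, hp, hq, hin⟩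
    obtain ⟨hp', hap⟩ := List.getElem?_eq_some_iff.mp hp
    obtain ⟨hq', hbq⟩ := List.getElem?_eq_some_iff.mp hq
    rw [PySem.List.length_sorted] at hp' hq'
    refine ⟨(p : Int), (PySem.List.mem_pyRange_one).mpr (by simp [PySem.List.len_eq, PySem.List.length_sorted]; omega), ?_⟩
    rw [List.any_eq_true]
    refine ⟨(q : Int), (PySem.List.mem_pyRange_one).mpr (by simp [PySem.List.len_eq, PySem.List.length_sorted]; omega), ?_⟩
    simp only [PySem.List.pyGetD_natCast, List.getD_eq_getElem?_getD, hp, hq, Option.getD_some]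
    exact hin

lemma pv_anyB_iff (xs : List String) :
    ((PySem.List.enumerate xs 0).any (fun ix =>
       (PySem.List.enumerate xs 0).any (fun jy =>
         ix.1 != jy.1 && PySem.Str.isIn ix.2 jy.2)) = true)
    ↔ (∃ p < xs.length, ∃ q < xs.length, p ≠ q ∧
        PySem.Str.isIn (xs.getD p "") (xs.getD q "") = true) := by
  rw [List.any_eq_true]
  constructor
  · rintro ⟨ix, hix, hinner⟩
    obtain ⟨ki, hki, rfl⟩ := (PySem.List.mem_enumerate_iff _ _ _).mp hix
    rw [List.any_eq_true] at hinner
    obtain ⟨jy, hjy, hgood⟩ := hinner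
    obtain ⟨kj, hkj, rfl⟩ := (PySem.List.mem_enumerate_iff _ _ _).mp hjy
    simp only [Bool.and_eq_true, bne_iff_ne, ne_eq] at hgood
    obtain ⟨hne, hin⟩ := hgood
    refine ⟨ki, hki, kj, hkj, by omega, ?_⟩
    simp only [List.getD_eq_getElem?_getD, List.getElem?_eq_getElem hki,
      List.getElem?_eq_getElem hkj, Option.getD_some]
    exact hin
  · rintro ⟨p, hp, q, hq, hpq, hin⟩
    simp only [List.getD_eq_getElem?_getD, List.getElem?_eq_getElem hp,
      List.getElem?_eq_getElem hq, Option.getD_some] at hin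
    refine ⟨(0 + (p : Int), xs[p]), (PySem.List.mem_enumerate_iff _ _ _).mpr ⟨p, hp, rfl⟩, ?_⟩
    rw [List.any_eq_true]
    refine ⟨(0 + (q : Int), xs[q]), (PySem.List.mem_enumerate_iff _ _ _).mpr ⟨q, hq, rfl⟩, ?_⟩
    simp only [Bool.and_eq_true, bne_iff_ne, ne_eq]
    exact ⟨by omega, hin⟩

-- ===== VERDICT (by name: the statements are the Claim_ definitions above) =====
theorem solution_spec : Claim_unchanged_solution := by
  intro xs _ hD
  unfold D_solution at hD
  unfold solution solution_alt
  by_cases h : pvHit xs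
  · have hA := (pv_anyA_iff xs).mpr h
    have hB : ((PySem.List.enumerate xs 0).any (fun ix =>
       (PySem.List.enumerate xs 0).any (fun jy =>
         ix.1 != jy.1 && PySem.Str.isIn ix.2 jy.2)) = true) := by
      rw [pv_anyB_iff]
      obtain ⟨p, hp, q, hq, hpq, _, hin⟩ := (pv_ord_iff xs).mpr h
      exact ⟨p, hp, q, hq, hpq, hin⟩
    simp only [hA, hB]
  · have hnsub : ¬ (∃ p < xs.length, ∃ q < xs.length, p ≠ q ∧
        PySem.Str.isIn (xs.getD p "") (xs.getD q "") = true) :=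
      fun hsub => hD ⟨hsub, fun hord => h ((pv_ord_iff xs).mp hord)⟩
    have hA : ((PySem.List.pyRange 0 (PySem.List.len (PySem.List.sorted xs (fun x => x) false)) 1).any (fun i =>
       (PySem.List.pyRange (i + 1) (PySem.List.len (PySem.List.sorted xs (fun x => x) false)) 1).any (fun j =>
         PySem.Str.isIn (PySem.List.pyGetD (PySem.List.sorted xs (fun x => x) false) i "")
                        (PySem.List.pyGetD (PySem.List.sorted xs (fun x => x) false) j "")))) = false := by
      rw [← Bool.not_eq_true, pv_anyA_iff]; exact h
    have hB : ((PySem.List.enumerate xs 0).any (fun ix =>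
       (PySem.List.enumerate xs 0).any (fun jy =>
         ix.1 != jy.1 && PySem.Str.isIn ix.2 jy.2))) = false := by
      rw [← Bool.not_eq_true, pv_anyB_iff]; exact hnsub
    simp only [hA, hB]

theorem solution_changed : Claim_changed_solution := by
  unfold Claim_changed_solution pvDiffWitness_solution pvDiffWitnessOut_solution
  have hle : ¬ ("b" : String) ≤ "ab" := by simp [String.le_iff_toList_le]; decide
  have hle2 : ("ab" : String) ≤ "b" := by simp [String.le_iff_toList_le]; decide
  refine ⟨by decide, ⟨?_, ?_⟩, ?_, by decide, by decide⟩
  · exact ⟨1, by decide, 0, by decide, by decide, by decide⟩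
  · rintro ⟨p, hp, q, hq, hpq, hle', hin⟩
    simp only [List.length_cons, List.length_nil] at hp hq
    interval_cases p <;> interval_cases q
    · exact hpq rfl
    · exact absurd hin (by decide)
    · exact hle hle'
    · exact hpq rfl
  · have hpw : List.Pairwise (fun a b : String => a ≤ b) ["ab", "b"] := by
      refine List.Pairwise.cons ?_ (List.pairwise_singleton _ _)
      intro y hy
      simp only [List.mem_singleton] at hy
      subst hy
      exact hle2
    have hs : PySem.List.sorted ["ab", "b"] (fun x => x) false = ["ab", "b"] :=
      PySem.List.sorted_eq_self_of_pairwise _ _ hpw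
    simp only [solution, hs]
    decide

theorem solution_tight : Claim_exact_solution := by
  intro xs _ hD
  unfold D_solution at hD
  obtain ⟨hsub, hord⟩ := hD
  have h : ¬ pvHit xs := fun hhit => hord ((pv_ord_iff xs).mpr hhit)
  have hA : ((PySem.List.pyRange 0 (PySem.List.len (PySem.List.sorted xs (fun x => x) false)) 1).any (fun i =>
       (PySem.List.pyRange (i + 1) (PySem.List.len (PySem.List.sorted xs (fun x => x) false)) 1).any (fun j =>
         PySem.Str.isIn (PySem.List.pyGetD (PySem.List.sorted xs (fun x => x) false) i "")
                        (PySem.List.pyGetD (PySem.List.sorted xs (fun x => x) false) j "")))) = false := by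
    rw [← Bool.not_eq_true, pv_anyA_iff]; exact h
  have hB := (pv_anyB_iff xs).mpr hsub
  unfold solution solution_alt
  simp only [hA, hB]
  decide
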